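-- pv_equiv track=rewrite | github.com/hugompfer/CD-3 | MiniP3/HttpHandler.py | getCredetentials
-- ===== SOURCE A (Python) =====
-- def getCredetentials(dic):
--     username=""
--     password=""
--     i=0
--     for key in dic.keys():
--         if i>=2:
--             return username,password
--         elif i==0:
--             username=dic[key]
--         else:
--             password=dic[key]
--         i+=1
--     return username,password
-- ===== SOURCE B (Python) =====
-- def getCredetentials(dic):
--     vals = list(dic.values())
--     return (vals[0] if len(vals) > 0 else "",
--             vals[1] if len(vals) > 1 else "")
-- ===== Notes on version B (the rewrite author's own statement) =====
-- stated objective: idiomatic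
-- what changed: Replaces the manual counter loop with early return and keyed re-lookups by materializing list(dic.values()) once and length-guarded positional indexing for the first two entries.
import Mathlib
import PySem

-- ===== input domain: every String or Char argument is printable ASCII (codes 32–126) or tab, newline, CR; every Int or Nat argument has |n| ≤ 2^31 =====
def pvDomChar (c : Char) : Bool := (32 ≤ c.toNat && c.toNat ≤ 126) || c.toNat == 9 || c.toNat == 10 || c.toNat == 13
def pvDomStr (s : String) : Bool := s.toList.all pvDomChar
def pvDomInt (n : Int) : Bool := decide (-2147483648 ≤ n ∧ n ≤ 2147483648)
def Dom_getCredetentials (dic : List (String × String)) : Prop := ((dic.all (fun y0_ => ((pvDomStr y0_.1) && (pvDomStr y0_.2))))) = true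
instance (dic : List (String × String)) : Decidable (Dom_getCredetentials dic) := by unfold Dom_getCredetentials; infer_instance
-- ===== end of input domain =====

-- B replaces A's counter loop (early return, keyed re-lookups) with the materialized
-- values list and length-guarded positional indexing; same cost, more idiomatic.

-- ===== PORT A =====
-- A's for-loop over dic.keys() with counter i, early return at i >= 2, and dic[key] lookups.
def gcLoop (d : PySem.Dict String String) (ks : List String) (username password : String) (i : Int) : String × String :=
  match ks with
  | [] => (username, password)
  | k :: rest =>
    if i ≥ 2 then (username, password)
    else if i = 0 then gcLoop d rest (d.getD k "") password (i + 1)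
    else gcLoop d rest username (d.getD k "") (i + 1)

def getCredetentials (dic : List (String × String)) : String × String :=
  let d := PySem.Dict.ofList dic
  gcLoop d d.keys "" "" 0

-- ===== PORT B =====
def getCredetentials_alt (dic : List (String × String)) : String × String :=
  let vals := (PySem.Dict.ofList dic).values
  ((if 0 < vals.length then vals.getD 0 "" else ""),
   (if 1 < vals.length then vals.getD 1 "" else ""))

-- ===== PRECONDITION & SPEC =====
def Spec_getCredetentials (dic : List (String × String)) (out : String × String) : Prop := out = getCredetentials_alt dic
instance (dic : List (String × String)) (out : String × String) : Decidable (Spec_getCredetentials dic out) := by unfold Spec_getCredetentials; infer_instance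

-- ===== CLAIM (what is proved, stated in full; the proofs are below) =====
def Claim_equal_getCredetentials : Prop := ∀ (dic : List (String × String)), Dom_getCredetentials dic → Spec_getCredetentials dic (getCredetentials dic)

-- ===== LEMMAS AND PROOFS =====

lemma gcLoop_done (d : PySem.Dict String String) (ks : List String) (u p : String) :
    gcLoop d ks u p 2 = (u, p) := by
  cases ks <;> simp [gcLoop]

-- ===== VERDICT (by name: the statement is the Claim_ definition above) =====
theorem getCredetentials_spec : Claim_equal_getCredetentials := by
  intro dic _
  unfold Spec_getCredetentials getCredetentials getCredetentials_alt
  have hv := PySem.Dict.values_eq_map_keys (PySem.Dict.ofList dic)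
      (PySem.Dict.nodup_keys_ofList dic) ""
  rcases hks : (PySem.Dict.ofList dic).keys with _ | ⟨k1, _ | ⟨k2, rest⟩⟩ <;>
    simp [gcLoop, gcLoop_done, hv, hks]
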